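-- pv_equiv track=rewrite | github.com/konstantin-ogulchansky/pfe | src/legacy/model/Model.py | graphe_init
-- ===== SOURCE A (Python) =====
-- def graphe_init(n0,N,qm):
--
--     if n0<qm:
--         raise NameError('n0 must be higher than the number of communities.')
--
-- #    d = [2 for i in range(n0)] + [0 for i in range(n0,N)]
-- #    e = [i for i in range(n0)] + [i for i in range(n0)]
-- #    vlist = [[1,n0-1]] + [[i-1,i+1] for i in range(1,n0-1)] + [[n0-2,0]] + [[] for i in range(n0,N)]
-- #    len_e = 2*n0
-- #    return d, e, vlist, len_e
--
--     d = [0 for i in range(N)]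
--     e = [[] for i in range(qm)]
--     vlist = [[] for i in range(N)]
--     nb_edges = 0
--
-- #    Q = list(range(qm))
--     Q = []
--     nodes_by_communities = [[] for i in range(qm)]
--     for nn in range(n0):
--         nodes_by_communities[nn%qm].append(nn)
--         Q.append(nn%qm)
--     return d, e, vlist, Q, nodes_by_communities, nb_edges
-- ===== SOURCE B (Python) =====
-- def graphe_init(n0, N, qm):
--
--     if n0 < qm:
--         raise NameError('n0 must be higher than the number of communities.')
--
--     # community-major build: community c owns exactly the nodes c, c+qm, c+2*qm, ... below n0,
--     # and Q is the pattern 0..qm-1 tiled ceil(n0/qm) times and truncated to n0 entries.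
--     reps = -(-n0 // qm) if qm > 0 else 0
--     Q = (list(range(qm)) * reps)[:n0]
--     nodes_by_communities = [list(range(c, n0, qm)) for c in range(qm)]
--
--     d = [0] * N
--     e = [[] for _ in range(qm)]
--     vlist = [[] for _ in range(N)]
--     return d, e, vlist, Q, nodes_by_communities, 0
-- ===== Notes on version B (the rewrite author's own statement) =====
-- stated objective: simpler
-- what changed: Replaces the node-major loop that appends each node into its community bucket and grows Q one modulo at a time by a direct community-major build: nodes_by_communities is [list(range(c, n0, qm)) for c in range(qm)] and Q is the tiled pattern (list(range(qm)) * ceil(n0/qm))[:n0], with no per-node loop at all.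
import Mathlib
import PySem

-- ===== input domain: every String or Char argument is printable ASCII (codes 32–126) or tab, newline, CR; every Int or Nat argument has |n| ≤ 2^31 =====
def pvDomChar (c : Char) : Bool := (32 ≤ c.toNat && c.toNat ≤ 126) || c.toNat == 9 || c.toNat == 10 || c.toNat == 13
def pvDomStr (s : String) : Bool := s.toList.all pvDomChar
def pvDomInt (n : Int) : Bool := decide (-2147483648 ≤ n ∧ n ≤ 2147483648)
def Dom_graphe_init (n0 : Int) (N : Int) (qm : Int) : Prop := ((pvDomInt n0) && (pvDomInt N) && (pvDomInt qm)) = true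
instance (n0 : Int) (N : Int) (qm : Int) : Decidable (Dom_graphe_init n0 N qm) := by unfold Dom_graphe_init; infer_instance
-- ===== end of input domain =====

-- B replaces A's node-major bucket loop by a direct community-major build (Q by tiling,
-- nodes_by_communities as stepped ranges); objective: simpler (no per-node loop).


-- ===== PORT A =====
-- Literal port of A.  Inside Pre_ the index nn % qm is nonnegative and < qm, so `.toNat`
-- on it is exact (outside Pre_ the Python raises and nothing is claimed).
def graphe_init (n0 : Int) (N : Int) (qm : Int) : List Int × List (List Int) × List (List Int) × List Int × List (List Int) × Int :=
  let d := (PySem.List.pyRange 0 N 1).map (fun _ => (0 : Int))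
  let e := (PySem.List.pyRange 0 qm 1).map (fun _ => ([] : List Int))
  let vlist := (PySem.List.pyRange 0 N 1).map (fun _ => ([] : List Int))
  let nb_edges : Int := 0
  let st := (PySem.List.pyRange 0 n0 1).foldl
      (fun (st : List (List Int) × List Int) nn =>
        (st.1.modify (PySem.Int.mod nn qm).toNat (fun l => l ++ [nn]),
         st.2 ++ [PySem.Int.mod nn qm]))
      ((PySem.List.pyRange 0 qm 1).map (fun _ => ([] : List Int)), ([] : List Int))
  (d, e, vlist, st.2, st.1, nb_edges)

-- ===== PORT B =====
def graphe_init_alt (n0 : Int) (N : Int) (qm : Int) : List Int × List (List Int) × List (List Int) × List Int × List (List Int) × Int :=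
  let reps : Int := if 0 < qm then -(PySem.Int.floordiv (-n0) qm) else 0
  let Q := PySem.List.slice (PySem.List.pyRepeat (PySem.List.pyRange 0 qm 1) reps) none (some n0)
  let nodes_by_communities := (PySem.List.pyRange 0 qm 1).map (fun c => PySem.List.pyRange c n0 qm)
  let d := PySem.List.pyRepeat [(0 : Int)] N
  let e := (PySem.List.pyRange 0 qm 1).map (fun _ => ([] : List Int))
  let vlist := (PySem.List.pyRange 0 N 1).map (fun _ => ([] : List Int))
  (d, e, vlist, Q, nodes_by_communities, 0)

-- ===== PRECONDITION & SPEC =====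
-- Pre_ excludes exactly the inputs where the Python A raises: n0 < qm (explicit NameError)
-- and 0 < n0 with qm ≤ 0 (ZeroDivisionError at nn % 0, or IndexError on a negative bucket index).
def Pre_graphe_init (n0 : Int) (N : Int) (qm : Int) : Prop := qm ≤ n0 ∧ (0 < qm ∨ n0 ≤ 0)
instance (n0 : Int) (N : Int) (qm : Int) : Decidable (Pre_graphe_init n0 N qm) := by unfold Pre_graphe_init; infer_instance
def pvWitness_graphe_init : Int × Int × Int := (5, 3, 2)

def Spec_graphe_init (n0 : Int) (N : Int) (qm : Int) (out : List Int × List (List Int) × List (List Int) × List Int × List (List Int) × Int) : Prop := out = graphe_init_alt n0 N qm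
instance (n0 : Int) (N : Int) (qm : Int) (out : List Int × List (List Int) × List (List Int) × List Int × List (List Int) × Int) : Decidable (Spec_graphe_init n0 N qm out) := by unfold Spec_graphe_init; infer_instance

-- ===== CLAIM (what is proved, stated in full; the proofs are below) =====
def Claim_equal_graphe_init : Prop := ∀ (n0 : Int) (N : Int) (qm : Int), Dom_graphe_init n0 N qm → Pre_graphe_init n0 N qm → Spec_graphe_init n0 N qm (graphe_init n0 N qm)

-- ===== LEMMAS AND PROOFS =====

theorem pairwise_stepRange (qm c m : Int) (hq : 0 < qm) :
    List.Pairwise (· < ·) (PySem.List.pyRange c m qm) := by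
  rw [PySem.List.pyRange_of_pos c m hq]
  refine List.pairwise_map.2 ?_
  refine (List.pairwise_lt_range).imp ?_
  intro i j hij
  have : (i : Int) < (j : Int) := by exact_mod_cast hij
  nlinarith

theorem mem_stepRange_iff (qm c m x : Int) (hq : 0 < qm) (hc0 : 0 ≤ c) (hcq : c < qm) :
    x ∈ PySem.List.pyRange c m qm ↔ (0 ≤ x ∧ x < m) ∧ PySem.Int.mod x qm = c := by
  rw [PySem.List.mem_pyRange_iff_of_pos hq]
  rw [PySem.Int.mod_eq_emod_of_pos hq]
  constructor
  · rintro ⟨h1, h2, k, hk⟩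
    have hx : x % qm = c := by
      have hxe : x = c + qm * k := by omega
      rw [hxe, Int.add_mul_emod_self_left, Int.emod_eq_of_lt hc0 hcq]
    exact ⟨⟨le_trans hc0 h1, h2⟩, hx⟩
  · rintro ⟨⟨h0, h2⟩, hx⟩
    have hdvd : qm ∣ x - c := by
      have := Int.emod_add_mul_ediv x qm
      exact ⟨x / qm, by omega⟩
    refine ⟨?_, h2, hdvd⟩
    rcases hdvd with ⟨k, hk⟩
    have hk0 : 0 ≤ k := by nlinarith
    nlinarith

theorem nodup_stepRange (qm c m : Int) (hq : 0 < qm) : (PySem.List.pyRange c m qm).Nodup :=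
  List.Pairwise.nodup (pairwise_stepRange qm c m hq)

theorem eq_of_perm_of_pairwise_lt (l1 l2 : List Int) (h : l1.Perm l2) (h1 : l1.Pairwise (· < ·)) (h2 : l2.Pairwise (· < ·)) : l1 = l2 := by
  exact List.Perm.eq_of_pairwise (fun a b _ _ hab hba => le_antisymm hab hba) (h1.imp le_of_lt) (h2.imp le_of_lt) h

theorem stepRange_eq_filter (qm c m : Int) (hq : 0 < qm) (hc0 : 0 ≤ c) (hcq : c < qm) :
    PySem.List.pyRange c m qm = (PySem.List.pyRange 0 m 1).filter (fun x => PySem.Int.mod x qm == c) := by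
  apply eq_of_perm_of_pairwise_lt _ _ ?_ (pairwise_stepRange qm c m hq) ((PySem.List.pairwise_lt_pyRange_one 0 m).filter _)
  rw [List.perm_ext_iff_of_nodup (nodup_stepRange qm c m hq) ((PySem.List.nodup_pyRange_one 0 m).filter _)]
  intro x
  rw [mem_stepRange_iff qm c m x hq hc0 hcq, List.mem_filter, PySem.List.mem_pyRange_one]
  simp

theorem fold_nbc (qm : Int) (hq : 0 < qm) (m : Nat) :
    ((PySem.List.pyRange 0 (m : Int) 1).foldl
      (fun (ls : List (List Int)) nn => ls.modify (PySem.Int.mod nn qm).toNat (fun l => l ++ [nn]))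
      ((PySem.List.pyRange 0 qm 1).map (fun _ => ([] : List Int))))
    = (PySem.List.pyRange 0 qm 1).map (fun c => (PySem.List.pyRange 0 (m : Int) 1).filter (fun x => PySem.Int.mod x qm == c)) := by
  induction m with
  | zero => simp [PySem.List.pyRange_one_eq_nil (le_refl (0:Int))]
  | succ k ih =>
    have hsp : PySem.List.pyRange 0 ((k:Int)+1) 1 = PySem.List.pyRange 0 (k:Int) 1 ++ [(k:Int)] :=
      PySem.List.pyRange_one_succ_right (by positivity)
    push_cast
    rw [hsp, List.foldl_append, ih, List.foldl_cons, List.foldl_nil]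
    have hmod0 : 0 ≤ PySem.Int.mod (k:Int) qm := PySem.Int.mod_nonneg _ hq
    have hmodlt : PySem.Int.mod (k:Int) qm < qm := PySem.Int.mod_lt _ hq
    apply List.ext_getElem
    · simp [List.length_modify]
    · intro j hj hj2
      rw [List.getElem_modify]
      have hjq : j < (qm - 0).toNat := by simpa [PySem.List.length_pyRange_one, List.length_modify] using hj
      have hel : (PySem.List.pyRange 0 qm 1)[j]'(by simp [PySem.List.length_pyRange_one]; omega) = (j : Int) := by
        rw [PySem.List.getElem_pyRange_one]; ring
      rw [List.getElem_map, List.getElem_map, hel, List.filter_append]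
      by_cases hc : ((PySem.Int.mod (k:Int) qm).toNat = j)
      · have : PySem.Int.mod (k:Int) qm = (j : Int) := by omega
        simp [this]
      · have : PySem.Int.mod (k:Int) qm ≠ (j : Int) := by omega
        simp [hc, this]

theorem tile_eq_map_mod (qm : Int) (hq : 0 < qm) (r : Nat) :
    PySem.List.pyRepeat (PySem.List.pyRange 0 qm 1) (r : Int)
    = (PySem.List.pyRange 0 (qm * r) 1).map (fun x => PySem.Int.mod x qm) := by
  induction r with
  | zero => simp [PySem.List.pyRepeat, PySem.List.pyRange_one_eq_nil (le_refl (0:Int))]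
  | succ k ih =>
    have hrep : PySem.List.pyRepeat (PySem.List.pyRange 0 qm 1) ((k:Int)+1)
        = PySem.List.pyRepeat (PySem.List.pyRange 0 qm 1) (k:Int) ++ PySem.List.pyRange 0 qm 1 := by
      simp [PySem.List.pyRepeat]
      rw [List.replicate_succ', List.flatten_append]
      simp
    have hsplit : PySem.List.pyRange 0 (qm * ((k:Int)+1)) 1
        = PySem.List.pyRange 0 (qm * k) 1 ++ PySem.List.pyRange (qm * k) (qm * k + qm) 1 := by
      rw [show qm * ((k:Int)+1) = qm * k + qm by ring]
      exact PySem.List.pyRange_one_append 0 (qm * k) (qm * k + qm) (by positivity) (by omega)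
    push_cast
    rw [hrep, hsplit, List.map_append, ih]
    congr 1
    rw [PySem.List.pyRange_one 0 qm, PySem.List.pyRange_one (qm*k) (qm*k+qm)]
    rw [show (qm * k + qm - qm * k) = qm by ring, show qm - (0:Int) = qm by ring, List.map_map]
    apply List.map_congr_left
    intro t ht
    have htq : (t : Int) < qm := by
      have := List.mem_range.1 ht; omega
    simp only [Function.comp]
    rw [PySem.Int.mod_eq_emod_of_pos hq, show qm * (k:Int) + (t:Int) = (t:Int) + qm * k by ring,
        Int.add_mul_emod_self_left, Int.emod_eq_of_lt (by positivity) htq]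
    omega

-- ===== VERDICT (by name: the statement is the Claim_ definition above) =====
theorem graphe_init_spec : Claim_equal_graphe_init := by
  intro n0 N qm _ hpre
  unfold Pre_graphe_init at hpre
  obtain ⟨h1, h2⟩ := hpre
  unfold Spec_graphe_init
  simp only [graphe_init, graphe_init_alt]
  rw [PySem.List.foldl_prod_mk (fun (ls : List (List Int)) nn => ls.modify (PySem.Int.mod nn qm).toNat (fun l => l ++ [nn])) (fun (q : List Int) nn => q ++ [PySem.Int.mod nn qm])]
  have hd : (PySem.List.pyRange 0 N 1).map (fun _ => (0 : Int)) = PySem.List.pyRepeat [(0 : Int)] N := by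
    rw [PySem.List.pyRepeat_singleton, List.map_const', PySem.List.length_pyRange_one, Int.sub_zero]
  by_cases hq : 0 < qm
  · -- the communities are nonempty: 1 ≤ qm ≤ n0
    have hn0 : 0 < n0 := lt_of_lt_of_le hq h1
    -- A's Q loop is the modulo map
    rw [PySem.List.foldl_append_singleton_eq_map (fun nn => PySem.Int.mod nn qm)]
    -- A's bucket loop is the residue-class filter table
    obtain ⟨m, hm⟩ : ∃ m : Nat, n0 = (m : Int) := ⟨n0.toNat, by omega⟩
    subst hm
    rw [fold_nbc qm hq m]
    -- B's stepped ranges are the same filters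
    have hnbc : (PySem.List.pyRange 0 qm 1).map (fun c => PySem.List.pyRange c (m : Int) qm)
        = (PySem.List.pyRange 0 qm 1).map (fun c => (PySem.List.pyRange 0 (m : Int) 1).filter (fun x => PySem.Int.mod x qm == c)) := by
      apply List.map_congr_left
      intro c hc
      have hcb := (PySem.List.mem_pyRange_one).1 hc
      exact stepRange_eq_filter qm c (m : Int) hq hcb.1 hcb.2
    -- B's tiled-and-truncated Q is the same modulo map
    rw [if_pos hq]
    have hb := (PySem.Int.neg_floordiv_neg_eq_iff_of_pos (a := (m : Int)) (b := qm) hq).1 rfl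
    set R : Int := -PySem.Int.floordiv (-(m : Int)) qm with hR
    have hR1 : 1 ≤ R := by nlinarith [hb.1, hb.2]
    obtain ⟨r, hr⟩ : ∃ r : Nat, R = (r : Int) := ⟨R.toNat, by omega⟩
    rw [hr, tile_eq_map_mod qm hq r]
    have hM : (m : Int) ≤ qm * (r : Int) := by nlinarith [hb.2]
    have hQ : PySem.List.slice ((PySem.List.pyRange 0 (qm * (r : Int)) 1).map (fun x => PySem.Int.mod x qm)) none (some (m : Int))
        = (PySem.List.pyRange 0 (m : Int) 1).map (fun x => PySem.Int.mod x qm) := by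
      rw [PySem.List.slice_to _ (by omega : (0:Int) ≤ (m : Int)), ← List.map_take,
          PySem.List.pyRange_one_append 0 (m : Int) (qm * (r : Int)) (by omega) hM,
          List.take_left' (by rw [PySem.List.length_pyRange_one]; omega)]
    rw [hQ, hnbc, hd]
    simp
  · -- qm ≤ 0, hence n0 ≤ 0: every range is empty on both sides
    have hqm0 : qm ≤ 0 := by omega
    have hn0 : n0 ≤ 0 := by rcases h2 with h | h <;> omega
    rw [if_neg hq, hd]
    simp [PySem.List.pyRange_one_eq_nil hn0, PySem.List.pyRange_one_eq_nil hqm0,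
          PySem.List.pyRepeat, PySem.List.slice]
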